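-- pv_equiv track=rewrite | github.com/Kawser-nerd/CLCDSA | Source Codes/CodeJamData/15/21/15.py | GetCheckPoint
-- ===== SOURCE A (Python) =====
-- def GetCheckPoint(x):
-- 	l = len(str(x))
-- 	if str(x).endswith('0' * (l-l//2)):
-- 		return GetCheckPoint(x-1)
-- 	else:
-- 		ret = int(str(x)[:l//2] + '0'* (l-l//2-1) + '1')
-- 		if str(x)[:l//2] == '1' + '0'*(l//2-1):
-- 			return GetCheckPoint(ret - 2)
-- 		return ret
-- ===== SOURCE B (Python) =====
-- def GetCheckPoint(x):
--     # iterative rewrite: one while-loop; split str(x) into head/half and tail,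
--     # test "all zeros" character-wise instead of building comparison strings
--     while True:
--         s = str(x)
--         h = len(s) // 2
--         head, tail = s[:h], s[h:]
--         if all(c == '0' for c in tail):
--             x -= 1
--             continue
--         ret = int(head + '0' * (len(tail) - 1) + '1')
--         if head.startswith('1') and all(c == '0' for c in head[1:]):
--             x = ret - 2
--         else:
--             return ret
-- ===== Notes on version B (the rewrite author's own statement) =====
-- stated objective: alternative
-- what changed: Replaces the tail-recursion that builds throwaway comparison strings ('0'*(l-l//2), '1'+'0'*(l//2-1)) with a single while-loop that splits str(x) once into head/tail halves and tests the patterns character-wise with all()/startswith.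
import Mathlib
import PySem

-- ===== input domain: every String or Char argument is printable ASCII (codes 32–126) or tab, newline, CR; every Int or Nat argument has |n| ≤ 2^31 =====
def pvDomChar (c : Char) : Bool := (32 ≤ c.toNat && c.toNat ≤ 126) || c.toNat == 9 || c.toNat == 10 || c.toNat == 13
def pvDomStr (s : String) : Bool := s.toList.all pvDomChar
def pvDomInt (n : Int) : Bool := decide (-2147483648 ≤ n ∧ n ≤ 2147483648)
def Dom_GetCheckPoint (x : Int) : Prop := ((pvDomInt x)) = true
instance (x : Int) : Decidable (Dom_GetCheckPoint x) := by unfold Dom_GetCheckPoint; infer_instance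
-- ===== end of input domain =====

-- B rewrites the digit-string tail-recursion as one while-loop that splits str(x) into
-- head/tail halves and tests the halves character-wise (objective: simpler decomposition).
-- Both ports carry a fuel counter as a totality guard only (the Python recursion/loop
-- terminates after at most a few steps on every int; fuel 100 is never exhausted on Dom).

-- ===== PORT A =====
-- int() in A always receives an optional sign followed by digits, so it never raises;
-- the .getD 0 default is unreachable.
def GetCheckPointGoA : Nat → Int → Int
  | 0, _ => 0
  | f+1, x =>
    let s := PySem.Int.toChars x
    let l : Int := PySem.Chars.len s
    if PySem.Chars.endswith s (List.replicate (l - PySem.Int.floordiv l 2).toNat '0') then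
      GetCheckPointGoA f (x - 1)
    else
      let ret := (PySem.Int.ofChars? (PySem.Chars.slice s none (some (PySem.Int.floordiv l 2))
                    ++ List.replicate (l - PySem.Int.floordiv l 2 - 1).toNat '0' ++ ['1'])).getD 0
      if PySem.Chars.slice s none (some (PySem.Int.floordiv l 2))
           = '1' :: List.replicate (PySem.Int.floordiv l 2 - 1).toNat '0' then
        GetCheckPointGoA f (ret - 2)
      else ret

def GetCheckPoint (x : Int) : Int := GetCheckPointGoA 100 x

-- ===== PORT B =====
def GetCheckPointGoB : Nat → Int → Int
  | 0, _ => 0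
  | f+1, x =>
    let s := PySem.Int.toChars x
    let h := PySem.Int.floordiv (PySem.Chars.len s) 2
    let head := PySem.Chars.slice s none (some h)
    let tail := PySem.Chars.slice s (some h) none
    if tail.all (· == '0') then
      GetCheckPointGoB f (x - 1)
    else
      let ret := (PySem.Int.ofChars? (head ++ List.replicate (tail.length - 1) '0' ++ ['1'])).getD 0
      if PySem.Chars.startswith head ['1'] && (PySem.Chars.slice head (some 1) none).all (· == '0') then
        GetCheckPointGoB f (ret - 2)
      else ret

def GetCheckPoint_alt (x : Int) : Int := GetCheckPointGoB 100 x

-- ===== PRECONDITION & SPEC =====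
def Spec_GetCheckPoint (x : Int) (out : Int) : Prop := out = GetCheckPoint_alt x
instance (x : Int) (out : Int) : Decidable (Spec_GetCheckPoint x out) := by unfold Spec_GetCheckPoint; infer_instance

-- ===== CLAIM (what is proved, stated in full; the proofs are below) =====
def Claim_equal_GetCheckPoint : Prop := ∀ (x : Int), Dom_GetCheckPoint x → Spec_GetCheckPoint x (GetCheckPoint x)

-- ===== LEMMAS AND PROOFS =====

theorem pv_floordiv_two (n : Nat) : PySem.Int.floordiv (n:Int) 2 = ((n/2:Nat):Int) := by
  unfold PySem.Int.floordiv
  rw [Int.fdiv_eq_ediv_of_nonneg _ (by norm_num : (0:Int) ≤ 2)]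
  omega

theorem pv_endswith_replicate (s : List Char) (k : Nat) (hk : k ≤ s.length) :
    PySem.Chars.endswith s (List.replicate k '0') = (s.drop (s.length - k)).all (· == '0') := by
  rw [Bool.eq_iff_iff, PySem.Chars.endswith_iff, List.suffix_iff_eq_drop]
  rw [List.all_eq_true, List.length_replicate]
  constructor
  · intro h c hc
    rw [← h] at hc
    simp [List.eq_of_mem_replicate hc]
  · intro h
    exact (List.eq_replicate_iff.mpr
      ⟨by rw [List.length_drop]; omega, fun b hb => by simpa using h b hb⟩).symm

theorem pv_head_pattern (s : List Char) (m : Nat) (hm : m ≤ s.length) :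
    (s.take m = '1' :: List.replicate (m - 1) '0')
      ↔ (PySem.Chars.startswith (s.take m) ['1'] && ((s.take m).tail).all (· == '0')) = true := by
  rw [Bool.and_eq_true, PySem.Chars.startswith_iff, List.all_eq_true]
  have hlen : (s.take m).length = m := by rw [List.length_take]; omega
  constructor
  · intro h
    rw [h]
    refine ⟨⟨List.replicate (m-1) '0', rfl⟩, ?_⟩
    intro c hc
    simp [List.eq_of_mem_replicate hc]
  · rintro ⟨⟨rest, hpre⟩, hall⟩
    rw [← hpre]
    have : rest = List.replicate (m - 1) '0' := by
      apply List.eq_replicate_iff.mpr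
      constructor
      · have := congrArg List.length hpre
        simp at this
        omega
      · intro b hb
        have : b ∈ (s.take m).tail := by rw [← hpre]; simp [hb]
        simpa using hall b this
    rw [this]
    rfl

theorem pv_go_eq (f : Nat) : ∀ x : Int, GetCheckPointGoA f x = GetCheckPointGoB f x := by
  induction f with
  | zero => intro x; rfl
  | succ f ih =>
    intro x
    show GetCheckPointGoA (f+1) x = GetCheckPointGoB (f+1) x
    unfold GetCheckPointGoA GetCheckPointGoB
    generalize PySem.Int.toChars x = s
    dsimp only
    rw [PySem.Chars.len_eq, pv_floordiv_two]
    rw [PySem.Chars.slice_eq_listSlice, PySem.List.slice_to_natCast,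
        PySem.Chars.slice_eq_listSlice s (some ((s.length/2 : Nat):Int)) none,
        PySem.List.slice_from_natCast,
        PySem.Chars.slice_eq_listSlice (s.take (s.length/2)) (some 1) none,
        PySem.List.slice_from_one]
    have e1 : ((s.length:Int) - ((s.length/2:Nat):Int)).toNat = s.length - s.length/2 := by omega
    have e2 : ((s.length:Int) - ((s.length/2:Nat):Int) - 1).toNat = s.length - s.length/2 - 1 := by omega
    have e3 : (((s.length/2:Nat):Int) - 1).toNat = s.length/2 - 1 := by omega
    have e4 : (s.drop (s.length/2)).length - 1 = s.length - s.length/2 - 1 := by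
      rw [List.length_drop]
    rw [e1, e2, e3, e4]
    have hc1 : PySem.Chars.endswith s (List.replicate (s.length - s.length/2) '0')
        = (s.drop (s.length/2)).all (· == '0') := by
      have ed : s.length - (s.length - s.length/2) = s.length/2 := by omega
      rw [pv_endswith_replicate s (s.length - s.length/2) (by omega), ed]
    rw [hc1]
    by_cases hc : (s.drop (s.length/2)).all (· == '0') = true
    · simp only [hc, if_true, ih]
    · simp only [Bool.not_eq_true] at hc
      simp only [hc, Bool.false_eq_true, if_false]
      have h2 := pv_head_pattern s (s.length/2) (by omega)
      by_cases hp : s.take (s.length/2) = '1' :: List.replicate (s.length/2 - 1) '0'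
      · rw [if_pos hp, if_pos (h2.mp hp), ih]
      · have : (PySem.Chars.startswith (s.take (s.length/2)) ['1']
            && ((s.take (s.length/2)).tail).all (· == '0')) = false := by
          rw [Bool.eq_false_iff]
          intro hq
          exact hp (h2.mpr hq)
        simp only [hp, this, if_false, Bool.false_eq_true]

-- ===== VERDICT (by name: the statement is the Claim_ definition above) =====
theorem GetCheckPoint_spec : Claim_equal_GetCheckPoint := by
  intro x _
  unfold Spec_GetCheckPoint GetCheckPoint GetCheckPoint_alt
  exact pv_go_eq 100 x
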